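-- pv_equiv track=rewrite | github.com/DylanDmitri/AdventOfCode | 2023/day6/script.py | scoresfor
-- ===== SOURCE A (Python) =====
-- def scoresfor(limit):
--     delta = limit-1
--     prior = 0
--     yield prior
--
--     for _ in range(limit):
--         prior = prior + delta
--         yield prior
--         delta -= 2
-- ===== SOURCE B (Python) =====
-- def scoresfor(limit):
--     yield 0
--     for k in range(1, limit + 1):
--         yield k * (limit - k)
-- ===== Notes on version B (the rewrite author's own statement) =====
-- stated objective: simpler
-- what changed: Replaces A's incremental difference engine (running prior plus a delta decremented by 2 each step) with a direct closed-form yield of k*(limit-k) per index, no mutable state.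
import Mathlib
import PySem

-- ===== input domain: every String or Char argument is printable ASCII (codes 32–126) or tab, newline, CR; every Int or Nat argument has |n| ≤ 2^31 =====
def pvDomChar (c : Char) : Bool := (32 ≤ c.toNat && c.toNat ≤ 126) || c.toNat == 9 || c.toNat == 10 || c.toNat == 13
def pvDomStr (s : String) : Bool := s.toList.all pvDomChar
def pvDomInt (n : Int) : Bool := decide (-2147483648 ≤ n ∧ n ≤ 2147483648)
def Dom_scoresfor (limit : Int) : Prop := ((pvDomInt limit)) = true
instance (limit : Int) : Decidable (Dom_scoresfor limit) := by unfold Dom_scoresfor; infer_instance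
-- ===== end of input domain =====

-- B replaces A's running accumulator/delta difference engine with a direct closed-form
-- term k*(limit-k) per index; no speed claim (both are one linear pass).

-- ===== PORT A =====
-- A: generator with state (prior, delta); yields collected into a list in order.
def scoresfor (limit : Int) : List Int :=
  (((PySem.List.pyRange 0 limit 1).foldl
    (fun (st : Int × Int × List Int) (_ : Int) =>
      let prior := st.1 + st.2.1
      (prior, st.2.1 - 2, st.2.2 ++ [prior])) (0, limit - 1, [0]))).2.2

-- ===== PORT B =====
def scoresfor_alt (limit : Int) : List Int :=
  0 :: (PySem.List.pyRange 1 (limit + 1) 1).map (fun k => k * (limit - k))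

-- ===== PRECONDITION & SPEC =====
def Spec_scoresfor (limit : Int) (out : List Int) : Prop := out = scoresfor_alt limit
instance (limit : Int) (out : List Int) : Decidable (Spec_scoresfor limit out) := by unfold Spec_scoresfor; infer_instance

-- ===== CLAIM (what is proved, stated in full; the proofs are below) =====
def Claim_equal_scoresfor : Prop := ∀ (limit : Int), Dom_scoresfor limit → Spec_scoresfor limit (scoresfor limit)

-- ===== LEMMAS AND PROOFS =====
theorem scoresfor_aux (limit : Int) (n : Nat) :
    (PySem.List.pyRange 0 (n : Int) 1).foldl
      (fun (st : Int × Int × List Int) (_ : Int) =>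
        let prior := st.1 + st.2.1
        (prior, st.2.1 - 2, st.2.2 ++ [prior])) (0, limit - 1, [0])
    = ((n : Int) * limit - (n : Int) * (n : Int), limit - 1 - 2 * (n : Int),
       0 :: (PySem.List.pyRange 1 ((n : Int) + 1) 1).map (fun k => k * (limit - k))) := by
  induction n with
  | zero => simp [PySem.List.pyRange_one_eq_nil]
  | succ m ih =>
    have h1 : PySem.List.pyRange 0 ((m : Int) + 1) 1
        = PySem.List.pyRange 0 (m : Int) 1 ++ [(m : Int)] :=
      PySem.List.pyRange_one_succ_right (by positivity)
    have h2 : PySem.List.pyRange 1 (((m : Int) + 1) + 1) 1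
        = PySem.List.pyRange 1 ((m : Int) + 1) 1 ++ [(m : Int) + 1] :=
      PySem.List.pyRange_one_succ_right (by omega)
    push_cast
    rw [h1, List.foldl_append, ih, h2]
    simp only [List.foldl_cons, List.foldl_nil, List.map_append, List.map_cons, List.map_nil]
    refine Prod.ext ?_ (Prod.ext ?_ ?_) <;> simp <;> ring

theorem scoresfor_spec' (limit : Int) : scoresfor limit = scoresfor_alt limit := by
  unfold scoresfor scoresfor_alt
  by_cases h : 0 ≤ limit
  · have : limit = ((limit.toNat : Nat) : Int) := by omega
    rw [this, scoresfor_aux]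
  · rw [PySem.List.pyRange_one_eq_nil (by omega),
        PySem.List.pyRange_one_eq_nil (by omega)]
    simp

-- ===== VERDICT (by name: the statement is the Claim_ definition above) =====
theorem scoresfor_spec : Claim_equal_scoresfor := by
  intro limit _
  exact scoresfor_spec' limit
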